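-- pv_equiv track=rewrite | github.com/log2timeline/plaso | plaso/filters/parser_filter.py | _GetParserAndPluginsList
-- ===== SOURCE A (Python) =====
-- def _GetParserAndPluginsList(parsers_and_plugins):
--   """Flattens the parsers and plugins dictionary into a list.
--
--   Args:
--     parsers_and_plugins (dict[str, set[str]]): parsers and plugins.
--
--   Returns:
--     list[str]: alphabetically sorted list of the parsers and plugins.
--   """
--   parser_filters = []
--   for parser_name, plugins in sorted(parsers_and_plugins.items()):
--     for plugin_name in sorted(plugins):
--       if plugin_name == '*':
--         parser_filters.append(parser_name)
--       else:
--         parser_filters.append('/'.join([parser_name, plugin_name]))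
--
--   return parser_filters
-- ===== SOURCE B (Python) =====
-- def _insert_sorted(ordered, pair):
--   """Inserts pair into the tuple-sorted list ordered, keeping it sorted.
--
--   Finds the insertion point by binary search.
--   """
--   low = 0
--   high = len(ordered)
--   while low < high:
--     middle = (low + high) // 2
--     if ordered[middle] < pair:
--       low = middle + 1
--     else:
--       high = middle
--   ordered.insert(low, pair)
--
--
-- def _GetParserAndPluginsList(parsers_and_plugins):
--   """Flattens the parsers and plugins dictionary into a list.
--
--   Maintains a single (parser, plugin) tuple list in sorted order by
--   binary-search insertion as it walks the dictionary once; no sort call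
--   is made.
--   """
--   ordered = []
--   for parser_name, plugins in parsers_and_plugins.items():
--     for plugin_name in plugins:
--       _insert_sorted(ordered, (parser_name, plugin_name))
--   return [parser_name if plugin_name == '*'
--           else '/'.join([parser_name, plugin_name])
--           for parser_name, plugin_name in ordered]
-- ===== Notes on version B (the rewrite author's own statement) =====
-- stated objective: alternative
-- what changed: A calls the built-in sort twice (sorted dict items, then sorted plugin set per parser) inside nested append loops; B never calls sort: it maintains one (parser, plugin) tuple list in sorted order by binary-search insertion while walking the dict once, then emits each tuple's string.
import Mathlib
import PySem

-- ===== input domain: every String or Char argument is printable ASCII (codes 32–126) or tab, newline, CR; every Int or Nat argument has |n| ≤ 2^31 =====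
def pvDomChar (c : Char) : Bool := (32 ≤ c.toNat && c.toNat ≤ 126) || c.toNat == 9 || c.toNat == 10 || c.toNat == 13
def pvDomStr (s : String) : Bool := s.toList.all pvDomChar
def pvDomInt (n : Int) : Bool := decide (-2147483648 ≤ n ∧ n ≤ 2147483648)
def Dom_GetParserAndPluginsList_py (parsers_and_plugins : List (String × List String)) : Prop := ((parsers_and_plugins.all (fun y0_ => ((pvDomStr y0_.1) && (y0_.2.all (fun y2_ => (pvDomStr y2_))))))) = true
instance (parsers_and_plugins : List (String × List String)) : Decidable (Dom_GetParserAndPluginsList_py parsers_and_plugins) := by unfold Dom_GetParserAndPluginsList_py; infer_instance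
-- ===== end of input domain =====

-- B replaces A's two built-in sorts (sorted items, sorted plugins, nested appends) by ONE
-- sorted (parser, plugin) tuple list maintained by binary-search insertion during a single
-- dict walk, then an emit map (alternative algorithm: incremental order maintenance, no sort call).


-- ===== PORT A =====
-- sorted(parsers_and_plugins.items()): the keys of a Python dict are distinct (Pre_), so the
-- tuple sort orders by the parser name alone; the plugin sets never get compared.
def GetParserAndPluginsList_py (parsers_and_plugins : List (String × List String)) : List String :=
  (PySem.List.sorted parsers_and_plugins (fun kv => kv.1)).foldl
    (fun parser_filters kv =>
      (PySem.List.sorted kv.2 (fun plugin_name => plugin_name)).foldl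
        (fun parser_filters plugin_name =>
          if plugin_name == "*" then parser_filters ++ [kv.1]
          else parser_filters ++ [PySem.Str.join "/" [kv.1, plugin_name]])
        parser_filters)
    []

-- ===== PORT B =====
-- the binary-search while loop of _insert_sorted; Python tuple '<' on (str, str) is the
-- lexicographic product order, compared via 'toLex'.  'ordered[middle]' is ported as getD:
-- the loop keeps low ≤ middle < high ≤ len(ordered), so the index is always in range and
-- the default is never produced (exact on every call the program makes).
def pvBisectLoop (ordered : List (String × String)) (pair : String × String)
    (low high : Nat) : Nat :=
  if low < high then
    if toLex (ordered.getD ((low + high) / 2) pair) < toLex pair then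
      pvBisectLoop ordered pair ((low + high) / 2 + 1) high
    else
      pvBisectLoop ordered pair low ((low + high) / 2)
  else low
termination_by high - low
decreasing_by all_goals omega

-- _insert_sorted: ordered.insert(low, pair)
def pvInsertAt (ordered : List (String × String)) (pair : String × String) :
    List (String × String) :=
  PySem.List.insert ordered ((pvBisectLoop ordered pair 0 ordered.length : Nat) : Int) pair

def GetParserAndPluginsList_py_alt (parsers_and_plugins : List (String × List String)) : List String :=
  let ordered := parsers_and_plugins.foldl
    (fun ordered kv => kv.2.foldl (fun ordered plugin_name => pvInsertAt ordered (kv.1, plugin_name)) ordered)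
    []
  ordered.map (fun pr => if pr.2 == "*" then pr.1 else PySem.Str.join "/" [pr.1, pr.2])

-- ===== PRECONDITION & SPEC =====
-- Pre_ restricts to the valid encodings of A's dict[str, set[str]] argument: an association
-- list with duplicate parser keys, or duplicate plugins inside one set, represents no Python
-- dict/set input at all, so nothing A returns on is excluded.
def Pre_GetParserAndPluginsList_py (parsers_and_plugins : List (String × List String)) : Prop :=
  (parsers_and_plugins.map Prod.fst).Nodup ∧ ∀ kv ∈ parsers_and_plugins, kv.2.Nodup
instance (parsers_and_plugins : List (String × List String)) : Decidable (Pre_GetParserAndPluginsList_py parsers_and_plugins) := by unfold Pre_GetParserAndPluginsList_py; infer_instance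
def pvWitness_GetParserAndPluginsList_py : (List (String × List String)) :=
  [("sqlite", ["*", "chrome_history"]), ("olecf", ["olecf_default"])]

def Spec_GetParserAndPluginsList_py (parsers_and_plugins : List (String × List String)) (out : List String) : Prop := out = GetParserAndPluginsList_py_alt parsers_and_plugins
instance (parsers_and_plugins : List (String × List String)) (out : List String) : Decidable (Spec_GetParserAndPluginsList_py parsers_and_plugins out) := by unfold Spec_GetParserAndPluginsList_py; infer_instance

-- ===== CLAIM (what is proved, stated in full; the proofs are below) =====
def Claim_equal_GetParserAndPluginsList_py : Prop := ∀ (parsers_and_plugins : List (String × List String)), Dom_GetParserAndPluginsList_py parsers_and_plugins → Pre_GetParserAndPluginsList_py parsers_and_plugins → Spec_GetParserAndPluginsList_py parsers_and_plugins (GetParserAndPluginsList_py parsers_and_plugins)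

-- ===== LEMMAS AND PROOFS =====

-- reference one-step insertion into a sorted list (proof-side model of _insert_sorted)
def pvInsertSorted (ordered : List (String × String)) (pair : String × String) :
    List (String × String) :=
  match ordered with
  | [] => [pair]
  | q :: rest => if toLex q < toLex pair then q :: pvInsertSorted rest pair else pair :: q :: rest

-- the flat (parser, plugin) table B's loops range over, in input order
def pvPairsOf (m : List (String × List String)) : List (String × String) :=
  m.flatMap (fun kv => kv.2.map (fun p => (kv.1, p)))

-- the binary search returns a split point: everything before it is < pair, nothing from it on is
theorem pvBisectLoop_spec (l : List (String × String)) (pair : String × String)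
    (hl : l.Pairwise (fun a b => toLex a ≤ toLex b)) :
    ∀ (n low high : Nat), high - low = n → low ≤ high → high ≤ l.length →
      (∀ i (h : i < l.length), i < low → toLex l[i] < toLex pair) →
      (∀ i (h : i < l.length), high ≤ i → ¬ toLex l[i] < toLex pair) →
      low ≤ pvBisectLoop l pair low high ∧ pvBisectLoop l pair low high ≤ high ∧
      (∀ i (h : i < l.length), i < pvBisectLoop l pair low high → toLex l[i] < toLex pair) ∧
      (∀ i (h : i < l.length), pvBisectLoop l pair low high ≤ i → ¬ toLex l[i] < toLex pair) := by
  have hmono : ∀ i j (hi : i < l.length) (hj : j < l.length), i ≤ j →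
      toLex l[i] ≤ toLex l[j] := by
    intro i j hi hj hij
    rcases Nat.lt_or_ge i j with h | h
    · exact (List.pairwise_iff_getElem.mp hl) i j hi hj h
    · have : i = j := le_antisymm hij h
      subst this; exact le_refl _
  intro n
  induction n using Nat.strong_induction_on with
  | _ n ih =>
    intro low high hn hlh hhl H1 H2
    rw [pvBisectLoop]
    by_cases hcase : low < high
    · rw [if_pos hcase]
      have hmidlt : (low + high) / 2 < high := by omega
      have hmidge : low ≤ (low + high) / 2 := by omega
      have hmidlen : (low + high) / 2 < l.length := by omega
      rw [List.getD_eq_getElem l pair hmidlen]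
      by_cases hc : toLex l[(low + high) / 2] < toLex pair
      · rw [if_pos hc]
        refine (ih (high - ((low + high) / 2 + 1)) (by omega) ((low + high) / 2 + 1) high
          rfl (by omega) hhl ?_ H2).imp (by omega) id
        intro i h hi
        exact lt_of_le_of_lt (hmono i ((low + high) / 2) h hmidlen (by omega)) hc
      · rw [if_neg hc]
        refine (ih ((low + high) / 2 - low) (by omega) low ((low + high) / 2)
          rfl hmidge (by omega) H1 ?_).imp id (fun h => ⟨by omega, h.2⟩)
        intro i h hi hlt
        exact hc (lt_of_le_of_lt (hmono ((low + high) / 2) i hmidlen h hi) hlt)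
    · rw [if_neg hcase]
      have : low = high := by omega
      subst this
      exact ⟨le_refl _, le_refl _, fun i h hi => H1 i h hi, fun i h hi => H2 i h hi⟩

-- any split point with those two properties is the point pvInsertSorted inserts at
theorem pvInsertSorted_eq_take_drop :
    ∀ (l : List (String × String)) (pair : String × String) (r : Nat), r ≤ l.length →
      (∀ i (h : i < l.length), i < r → toLex l[i] < toLex pair) →
      (∀ i (h : i < l.length), r ≤ i → ¬ toLex l[i] < toLex pair) →
      pvInsertSorted l pair = l.take r ++ pair :: l.drop r := by
  intro l
  induction l with
  | nil =>
    intro pair r hr _ _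
    have : r = 0 := by simpa using hr
    subst this
    simp [pvInsertSorted]
  | cons q t ih =>
    intro pair r hr H1 H2
    match r with
    | 0 =>
      have hq : ¬ toLex q < toLex pair := H2 0 (by simp) (le_refl _)
      simp [pvInsertSorted, hq]
    | Nat.succ s =>
      have hq : toLex q < toLex pair := H1 0 (by simp) (by omega)
      simp only [pvInsertSorted, if_pos hq, List.take_succ_cons, List.drop_succ_cons,
        List.cons_append]
      congr 1
      refine ih pair s (by simpa using hr) ?_ ?_
      · intro i h hi
        have := H1 (i + 1) (by simpa using h) (by omega)
        simpa using this
      · intro i h hi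
        have := H2 (i + 1) (by simpa using h) (by omega)
        simpa using this

-- on a sorted accumulator, binary-search insertion is the one-step sorted insertion
theorem pvInsertAt_eq (l : List (String × String)) (pair : String × String)
    (hl : l.Pairwise (fun a b => toLex a ≤ toLex b)) :
    pvInsertAt l pair = pvInsertSorted l pair := by
  obtain ⟨_, hle, H1, H2⟩ := pvBisectLoop_spec l pair hl (l.length - 0) 0 l.length rfl
    (Nat.zero_le _) (le_refl _) (fun i h hi => absurd hi (by omega))
    (fun i h hi => absurd h (by omega))
  unfold pvInsertAt
  rw [PySem.List.insert_natCast l (pvBisectLoop l pair 0 l.length) pair hle,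
    pvInsertSorted_eq_take_drop l pair (pvBisectLoop l pair 0 l.length) hle H1 H2]

theorem pvInsertSorted_perm (l : List (String × String)) (pr : String × String) :
    (pvInsertSorted l pr).Perm (pr :: l) := by
  induction l with
  | nil => simp [pvInsertSorted]
  | cons q rest ih =>
    unfold pvInsertSorted
    split
    · exact ((ih.cons q).trans (List.Perm.swap pr q rest))
    · exact List.Perm.refl _

theorem pvInsertSorted_pairwise (l : List (String × String)) (pr : String × String)
    (hl : l.Pairwise (fun a b => toLex a ≤ toLex b)) :
    (pvInsertSorted l pr).Pairwise (fun a b => toLex a ≤ toLex b) := by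
  induction l with
  | nil => simp [pvInsertSorted]
  | cons q rest ih =>
    rw [List.pairwise_cons] at hl
    unfold pvInsertSorted
    split
    · rename_i hlt
      rw [List.pairwise_cons]
      refine ⟨?_, ih hl.2⟩
      intro y hy
      rcases List.mem_cons.mp ((pvInsertSorted_perm rest pr).mem_iff.mp hy) with h | h
      · subst h; exact le_of_lt hlt
      · exact hl.1 y h
    · rename_i hnlt
      rw [List.pairwise_cons]
      refine ⟨?_, List.pairwise_cons.mpr hl⟩
      intro y hy
      rcases List.mem_cons.mp hy with h | h
      · subst h; exact le_of_not_gt hnlt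
      · exact le_trans (le_of_not_gt hnlt) (hl.1 y h)

-- on a sorted accumulator the whole insertion fold may be read with pvInsertSorted
theorem pvFoldl_insertAt_eq (l : List (String × String)) (acc : List (String × String))
    (hacc : acc.Pairwise (fun a b => toLex a ≤ toLex b)) :
    l.foldl pvInsertAt acc = l.foldl pvInsertSorted acc := by
  induction l generalizing acc with
  | nil => rfl
  | cons x t ih =>
    simp only [List.foldl_cons]
    rw [pvInsertAt_eq acc x hacc]
    exact ih _ (pvInsertSorted_pairwise acc x hacc)

theorem pvFoldl_insert_perm (l : List (String × String)) (acc : List (String × String)) :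
    (l.foldl pvInsertSorted acc).Perm (acc ++ l) := by
  induction l generalizing acc with
  | nil => simp
  | cons x t ih =>
    simp only [List.foldl_cons]
    exact (ih _).trans (((pvInsertSorted_perm acc x).append_right t).trans List.perm_middle.symm)

theorem pvFoldl_insert_pairwise (l : List (String × String)) (acc : List (String × String))
    (hacc : acc.Pairwise (fun a b => toLex a ≤ toLex b)) :
    (l.foldl pvInsertSorted acc).Pairwise (fun a b => toLex a ≤ toLex b) := by
  induction l generalizing acc with
  | nil => exact hacc
  | cons x t ih => exact ih _ (pvInsertSorted_pairwise acc x hacc)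

-- B's double insertion loop is the single insertion fold over the flat pair table
theorem pvDoubleFoldl_eq (m : List (String × List String)) (acc : List (String × String)) :
    m.foldl (fun ordered kv => kv.2.foldl (fun o p => pvInsertAt o (kv.1, p)) ordered) acc
      = (pvPairsOf m).foldl pvInsertAt acc := by
  induction m generalizing acc with
  | nil => rfl
  | cons kv t ih =>
    simp only [List.foldl_cons, pvPairsOf, List.flatMap_cons, List.foldl_append, List.foldl_map]
    simp only [pvPairsOf] at ih
    exact ih _

-- insertion-maintained order coincides with the single stable sort of the pair table
theorem pvInsertionSort_eq_sorted (l : List (String × String)) :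
    l.foldl pvInsertSorted [] = PySem.List.sorted l (fun pr => toLex pr) := by
  refine List.Perm.eq_of_pairwise
    (fun a b _ _ h1 h2 => toLex.injective (le_antisymm h1 h2)) ?_ ?_ ?_
  · exact pvFoldl_insert_pairwise l [] (by simp)
  · exact PySem.List.sorted_pairwise l (fun pr => toLex pr)
  · exact ((pvFoldl_insert_perm l []).trans (by simp)).trans
      (PySem.List.sorted_perm l (fun pr => toLex pr) false).symm

-- The single tuple sort of the flattened pairs equals the nested-sort traversal, read as pairs.
theorem pvSortedPairs_eq (m : List (String × List String))
    (h1 : (m.map Prod.fst).Nodup) (h2 : ∀ kv ∈ m, kv.2.Nodup) :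
    PySem.List.sorted (pvPairsOf m) (fun pr => toLex pr)
      = (PySem.List.sorted m (fun kv => kv.1)).flatMap
          (fun kv => (PySem.List.sorted kv.2 (fun p => p)).map (fun p => (kv.1, p))) := by
  set s := PySem.List.sorted m (fun kv => kv.1) with hs
  have hsp : s.Perm m := PySem.List.sorted_perm m (fun kv => kv.1) false
  apply PySem.List.sorted_eq_of_perm_of_pairwise_lt
  · -- permutation
    exact hsp.flatMap (fun kv _ => (PySem.List.sorted_perm kv.2 (fun p => p) false).map _)
  · -- strict lexicographic pairwise order
    rw [List.pairwise_flatMap]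
    constructor
    · intro kv hkv
      rw [List.pairwise_map]
      have hnd : (PySem.List.sorted kv.2 (fun p => p)).Nodup :=
        ((PySem.List.sorted_perm kv.2 (fun p => p) false).nodup_iff).mpr
          (h2 kv (hsp.mem_iff.mp hkv))
      have hle := PySem.List.sorted_pairwise kv.2 (fun p => p)
      refine (hle.and hnd).imp ?_
      intro a b ⟨hab, hne⟩
      exact Prod.Lex.toLex_lt_toLex.mpr (Or.inr ⟨rfl, lt_of_le_of_ne hab hne⟩)
    · have hndk : (s.map Prod.fst).Nodup := ((hsp.map Prod.fst).nodup_iff).mpr h1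
      have hles := PySem.List.sorted_pairwise m (fun kv => kv.1)
      rw [← hs] at hles
      have hlt : s.Pairwise (fun a b => a.1 < b.1) := by
        have hne : s.Pairwise (fun a b => a.1 ≠ b.1) := by
          unfold List.Nodup at hndk; rw [List.pairwise_map] at hndk; exact hndk
        exact (hles.and hne).imp (fun h => lt_of_le_of_ne h.1 h.2)
      refine hlt.imp ?_
      intro a b hab x hx y hy
      obtain ⟨p, _, rfl⟩ := List.mem_map.mp hx
      obtain ⟨q, _, rfl⟩ := List.mem_map.mp hy
      exact Prod.Lex.toLex_lt_toLex.mpr (Or.inl hab)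

-- ===== VERDICT (by name: the statement is the Claim_ definition above) =====
theorem GetParserAndPluginsList_py_spec : Claim_equal_GetParserAndPluginsList_py := by
  intro m _ hpre
  obtain ⟨h1, h2⟩ := hpre
  unfold Spec_GetParserAndPluginsList_py GetParserAndPluginsList_py
  simp only [GetParserAndPluginsList_py_alt]
  rw [pvDoubleFoldl_eq, pvFoldl_insertAt_eq _ _ (by simp), pvInsertionSort_eq_sorted,
    pvSortedPairs_eq m h1 h2]
  set s := PySem.List.sorted m (fun kv => kv.1)
  -- fold the inner if into the appended element, then turn both folds into flatMap/map
  have hinner : ∀ (kv : String × List String) (acc : List String),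
      (PySem.List.sorted kv.2 (fun p => p)).foldl
        (fun parser_filters plugin_name =>
          if plugin_name == "*" then parser_filters ++ [kv.1]
          else parser_filters ++ [PySem.Str.join "/" [kv.1, plugin_name]]) acc
      = acc ++ (PySem.List.sorted kv.2 (fun p => p)).map
          (fun p => if p == "*" then kv.1 else PySem.Str.join "/" [kv.1, p]) := by
    intro kv acc
    rw [← PySem.List.foldl_append_singleton_eq_map]
    congr 1
    funext a p
    split <;> rfl
  calc s.foldl
        (fun parser_filters kv =>
          (PySem.List.sorted kv.2 (fun plugin_name => plugin_name)).foldl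
            (fun parser_filters plugin_name =>
              if plugin_name == "*" then parser_filters ++ [kv.1]
              else parser_filters ++ [PySem.Str.join "/" [kv.1, plugin_name]])
            parser_filters) []
      = s.foldl (fun acc kv => acc ++ (PySem.List.sorted kv.2 (fun p => p)).map
          (fun p => if p == "*" then kv.1 else PySem.Str.join "/" [kv.1, p])) [] := by
        congr 1
        funext acc kv
        exact hinner kv acc
    _ = s.flatMap (fun kv => (PySem.List.sorted kv.2 (fun p => p)).map
          (fun p => if p == "*" then kv.1 else PySem.Str.join "/" [kv.1, p])) :=
        PySem.List.foldl_append_eq_flatMap _ s []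
    _ = (s.flatMap (fun kv => (PySem.List.sorted kv.2 (fun p => p)).map
          (fun p => (kv.1, p)))).map
          (fun pr => if pr.2 == "*" then pr.1 else PySem.Str.join "/" [pr.1, pr.2]) := by
        rw [List.map_flatMap]
        congr 1
        funext kv
        rw [List.map_map]
        rfl
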